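-- pv_equiv track=rewrite | github.com/alexaasha/Motion-Estimation | coder.py | ac_coder
-- ===== SOURCE A (Python) =====
-- import math
--
-- def ac_coder(ac_s):
--     bits_ac = 0
--     i = 0
--     last_n_zero = len(ac_s['AC'])
--     for ind, reverse in zip(range(len(ac_s['AC'])), reversed(ac_s['AC'])):
--         if reverse != 0:
--             break
--         last_n_zero = ind
--
--     last_n_zero = len(ac_s['AC']) - last_n_zero - 1
--     while i < last_n_zero:
--         counter_of_zeros = 0
--         while counter_of_zeros < 15 and i < last_n_zero and ac_s['AC'][i] == 0:
--             counter_of_zeros += 1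
--             i += 1
--         if counter_of_zeros < 15 and i < last_n_zero and ac_s['AC'][i] != 0:
--             bits_ac += math.ceil(math.log(abs(ac_s['AC'][i]) + 1, 2)) + 8
--             i += 1
--         elif counter_of_zeros >= 15:
--             bits_ac += 8
--
--     return bits_ac + 8
-- ===== SOURCE B (Python) =====
-- import math
--
--
-- def ac_coder(ac_s):
--     ac = ac_s['AC']
--     bits = 8  # end-of-block marker
--     # Coefficients are coded only in front of the block's terminating zero run;
--     # a block that does not end in zero has no end-of-block run and codes no
--     # coefficients at all.
--     if ac and ac[-1] == 0:
--         t = 0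
--         for v in reversed(ac):
--             if v != 0:
--                 break
--             t += 1
--         # run-length table of the coded region: (zeros before value, value) pairs
--         table = []
--         run = 0
--         for v in ac[:len(ac) - t]:
--             if v == 0:
--                 run += 1
--             else:
--                 table.append((run, v))
--                 run = 0
--         # 8*(run//15) bits of ZRL markers per long zero run, category + 8 bits per value
--         bits += sum(8 * (r // 15) + math.ceil(math.log(abs(v) + 1, 2)) + 8
--                     for r, v in table)
--     return bits
-- ===== Notes on version B (the rewrite author's own statement) =====
-- stated objective: alternative
-- what changed: A's single index-driven scan with a nested 15-bounded inner while and sentinel limit arithmetic is replaced by separate passes: detect the terminating zero run, build an explicit (zero_run, value) run-length table of the coded region, then sum 8*(run//15) ZRL markers plus the per-value bit cost over that table; Pre_ excludes only dicts without an 'AC' key, on which A raises KeyError.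
import Mathlib
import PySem

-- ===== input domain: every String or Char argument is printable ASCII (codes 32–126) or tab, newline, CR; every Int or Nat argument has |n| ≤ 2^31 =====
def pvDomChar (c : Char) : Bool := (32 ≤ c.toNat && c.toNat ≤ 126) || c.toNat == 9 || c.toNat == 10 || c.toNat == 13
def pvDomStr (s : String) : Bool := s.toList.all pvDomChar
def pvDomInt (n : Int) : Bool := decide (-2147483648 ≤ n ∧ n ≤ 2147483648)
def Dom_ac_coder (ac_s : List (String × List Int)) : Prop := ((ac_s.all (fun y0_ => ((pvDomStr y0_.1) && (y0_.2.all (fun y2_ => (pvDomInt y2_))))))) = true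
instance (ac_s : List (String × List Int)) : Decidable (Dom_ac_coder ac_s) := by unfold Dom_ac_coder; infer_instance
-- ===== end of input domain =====

-- B replaces A's index-driven nested-while scan by an end-of-block test, a trailing-zero count,
-- an explicit (zero_run, value) run-length table of the coded region, and a summation over that
-- table (alternative decomposition; same cost).


-- ===== PORT A =====
-- hand-port of math.ceil(math.log(abs(v) + 1, 2)) (both Pythons contain this exact expression):
-- exact for |v| ≤ 2^31, where CPython's double log over-rounds exactly at |v| = 2^29-1 and 2^31-1
-- (checked exhaustively around every power of two); equals bit_length(|v|) everywhere else.
def pvCeilLogF (v : Int) : Int :=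
  (PySem.Int.bitLength v : Int) + (if v.natAbs = 536870911 ∨ v.natAbs = 2147483647 then 1 else 0)

-- the 'for ind, reverse in zip(range(len), reversed(AC)): if reverse != 0: break; last_n_zero = ind' loop
def pvLastA : List Int → Nat → Int → Int
  | [], _, acc => acc
  | r :: rest, ind, acc => if r ≠ 0 then acc else pvLastA rest (ind + 1) (ind : Int)

-- inner 'while counter_of_zeros < 15 and i < last_n_zero and ac[i] == 0' (fuel = 15 - counter)
def pvInnerA (ac : List Int) (limit : Int) : Nat → Nat → Nat → Nat × Nat
  | 0, c, i => (c, i)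
  | f + 1, c, i =>
      if (i : Int) < limit ∧ PySem.List.pyGetD ac (i : Int) 0 = 0
      then pvInnerA ac limit f (c + 1) (i + 1) else (c, i)

-- outer 'while i < last_n_zero' loop; fuel ac.length + 1 suffices (i advances every iteration)
def pvOuterA (ac : List Int) (limit : Int) : Nat → Nat → Int → Int
  | 0, _, bits => bits
  | f + 1, i, bits =>
      if (i : Int) < limit then
        let p := pvInnerA ac limit 15 0 i
        if p.1 < 15 ∧ ((p.2 : Int) < limit ∧ PySem.List.pyGetD ac (p.2 : Int) 0 ≠ 0) then
          pvOuterA ac limit f (p.2 + 1) (bits + pvCeilLogF (PySem.List.pyGetD ac (p.2 : Int) 0) + 8)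
        else if 15 ≤ p.1 then
          pvOuterA ac limit f p.2 (bits + 8)
        else
          pvOuterA ac limit f p.2 bits
      else bits

def ac_coder (ac_s : List (String × List Int)) : Int :=
  let ac := ((PySem.Dict.mk ac_s).get? "AC").getD []   -- ac_s['AC']; Pre_ excludes the KeyError
  let last := pvLastA ac.reverse 0 (PySem.List.len ac)
  let limit := PySem.List.len ac - last - 1
  pvOuterA ac limit (ac.length + 1) 0 0 + 8

-- ===== PORT B =====
-- 'for v in reversed(ac): if v != 0: break; t += 1'
def pvTrail : List Int → Nat
  | [] => 0
  | v :: rest => if v ≠ 0 then 0 else pvTrail rest + 1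

-- run-length table build: 'for v in ...: if v == 0: run += 1 else: table.append((run, v)); run = 0'
def pvTable : List Int → Nat → List (Nat × Int)
  | [], _ => []
  | v :: vs, run => if v = 0 then pvTable vs (run + 1) else (run, v) :: pvTable vs 0

def ac_coder_alt (ac_s : List (String × List Int)) : Int :=
  let ac := ((PySem.Dict.mk ac_s).get? "AC").getD []   -- ac_s['AC']; Pre_ excludes the KeyError
  if ac.getLast? = some 0 then                         -- 'if ac and ac[-1] == 0'
    let t := pvTrail ac.reverse
    8 + ((pvTable (ac.take (ac.length - t)) 0).map     -- ac[:len(ac)-t], exact: 0 ≤ len-t ≤ len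
          (fun p => 8 * ((p.1 / 15 : Nat) : Int) + pvCeilLogF p.2 + 8)).sum
  else 8

-- ===== PRECONDITION & SPEC =====
-- Pre_ excludes exactly the dicts without an 'AC' key, on which Python A raises KeyError.
def Pre_ac_coder (ac_s : List (String × List Int)) : Prop := "AC" ∈ ac_s.map Prod.fst
instance (ac_s : List (String × List Int)) : Decidable (Pre_ac_coder ac_s) := by
  unfold Pre_ac_coder; infer_instance
def pvWitness_ac_coder : (List (String × List Int)) := [("AC", [3, 0])]

def Spec_ac_coder (ac_s : List (String × List Int)) (out : Int) : Prop := out = ac_coder_alt ac_s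
instance (ac_s : List (String × List Int)) (out : Int) : Decidable (Spec_ac_coder ac_s out) := by
  unfold Spec_ac_coder; infer_instance

-- ===== CLAIM (what is proved, stated in full; the proofs are below) =====
def Claim_equal_ac_coder : Prop := ∀ (ac_s : List (String × List Int)), Dom_ac_coder ac_s → Pre_ac_coder ac_s → Spec_ac_coder ac_s (ac_coder ac_s)

-- ===== LEMMAS AND PROOFS =====

-- B's per-run contribution, folded over the remaining list with a pending zero run
def pvS : List Int → Nat → Int
  | [], _ => 0
  | v :: vs, run =>
      if v = 0 then pvS vs (run + 1)
      else 8 * ((run / 15 : Nat) : Int) + pvCeilLogF v + 8 + pvS vs 0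

theorem pvSum_table (l : List Int) (run : Nat) :
    ((pvTable l run).map (fun p => 8 * ((p.1 / 15 : Nat) : Int) + pvCeilLogF p.2 + 8)).sum
      = pvS l run := by
  induction l generalizing run with
  | nil => simp [pvTable, pvS]
  | cons v vs ih =>
    by_cases h : v = 0
    · simp only [pvTable, pvS, if_pos h, ih]
    · simp only [pvTable, pvS, if_neg h, List.map_cons, List.sum_cons, ih]

theorem pvLastA_eq (l : List Int) (n : Nat) (a : Int) :
    pvLastA l n a = if pvTrail l = 0 then a else (n : Int) + pvTrail l - 1 := by
  induction l generalizing n a with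
  | nil => simp [pvLastA, pvTrail]
  | cons r rest ih =>
    by_cases h : r = 0
    · simp only [pvLastA, pvTrail, h]
      rw [ih]
      by_cases h2 : pvTrail rest = 0 <;> simp [h2] <;> ring
    · simp [pvLastA, pvTrail, h]

theorem pvTrail_le (l : List Int) : pvTrail l ≤ l.length := by
  induction l with
  | nil => simp [pvTrail]
  | cons v vs ih => by_cases h : v = 0 <;> simp [pvTrail, h] <;> omega

theorem pvTrail_take (l : List Int) : l.take (pvTrail l) = List.replicate (pvTrail l) 0 := by
  induction l with
  | nil => simp [pvTrail]
  | cons v vs ih => by_cases h : v = 0 <;> simp [pvTrail, h, List.replicate_succ, ih]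

theorem pvTrail_getElem (l : List Int) (h : pvTrail l < l.length) : l[pvTrail l] ≠ 0 := by
  induction l with
  | nil => simp [pvTrail] at h
  | cons v vs ih =>
    by_cases hv : v = 0
    · have h' : pvTrail vs < vs.length := by simp [pvTrail, hv] at h; omega
      simpa [pvTrail, hv] using ih h'
    · simpa [pvTrail, hv] using hv

theorem pvTrail_lt (l : List Int) (hne : l ≠ []) (hlast : l.getLast? ≠ some (0 : Int)) :
    pvTrail l < l.length := by
  induction l with
  | nil => simp at hne
  | cons v vs ih =>
    by_cases hv : v = 0
    · have hvs : vs ≠ [] := by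
        rintro rfl; simp [hv] at hlast
      obtain ⟨w, ws, rfl⟩ := List.exists_cons_of_ne_nil hvs
      have h2 := ih (by simp) (by rwa [List.getLast?_cons_cons] at hlast)
      have hstep : pvTrail (v :: w :: ws) = pvTrail (w :: ws) + 1 := by
        simp only [pvTrail, hv]; simp
      simp only [List.length_cons] at h2 ⊢
      omega
    · simp [pvTrail, hv]

theorem pvDropTake_cons (ac : List Int) (L i : Nat) (hL : L ≤ ac.length) (hi : i < L) :
    (ac.take L).drop i = ac[i]'(by omega) :: (ac.take L).drop (i + 1) := by
  rw [List.drop_eq_getElem_cons (by simp; omega)]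
  congr 1
  exact List.getElem_take

theorem pvGetD_eq (ac : List Int) (i : Nat) (h : i < ac.length) :
    PySem.List.pyGetD ac (i : Int) 0 = ac[i] := by
  simp [PySem.List.pyGetD_natCast]
  exact List.getD_eq_getElem ac 0 h

theorem pvInnerA_eq (ac : List Int) (L : Nat) (hL : L ≤ ac.length) (f c i : Nat) (hi : i ≤ L) :
    pvInnerA ac (L : Int) f c i =
      (c + min f (pvTrail ((ac.take L).drop i)), i + min f (pvTrail ((ac.take L).drop i))) := by
  induction f generalizing c i with
  | zero => simp [pvInnerA]
  | succ f ih =>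
    by_cases hi' : i < L
    · have hil : i < ac.length := by omega
      have hcons := pvDropTake_cons ac L i hL hi'
      by_cases hz : ac[i] = 0
      · have hcond : ((i : Int) < (L : Int) ∧ PySem.List.pyGetD ac (i : Int) 0 = 0) := by
          refine ⟨by exact_mod_cast hi', by rw [pvGetD_eq ac i hil]; exact hz⟩
        have htr : pvTrail ((ac.take L).drop i) = pvTrail ((ac.take L).drop (i + 1)) + 1 := by
          rw [hcons]; simp [pvTrail, hz]
        rw [pvInnerA, if_pos hcond, ih (c + 1) (i + 1) (by omega), htr]
        simp only [Prod.mk.injEq]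
        constructor <;> omega
      · have hcond : ¬ ((i : Int) < (L : Int) ∧ PySem.List.pyGetD ac (i : Int) 0 = 0) := by
          rw [pvGetD_eq ac i hil]; tauto
        have htr : pvTrail ((ac.take L).drop i) = 0 := by
          rw [hcons]; simp [pvTrail, hz]
        rw [pvInnerA, if_neg hcond, htr]
        simp
    · have hiL : i = L := by omega
      have hnil : (ac.take L).drop i = [] := by
        apply List.drop_eq_nil_of_le; simp; omega
      have hcond : ¬ ((i : Int) < (L : Int) ∧ PySem.List.pyGetD ac (i : Int) 0 = 0) := by
        rintro ⟨h1, -⟩; exact absurd (by exact_mod_cast h1 : i < L) (by omega)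
      rw [pvInnerA, if_neg hcond, hnil]
      simp [pvTrail]

theorem pvGetLast?_drop (l : List Int) (k : Nat) (h : k < l.length) :
    (l.drop k).getLast? = l.getLast? := by
  rw [List.getLast?_eq_getElem?, List.getLast?_eq_getElem?]
  rw [List.getElem?_drop]
  congr 1
  simp
  omega

theorem pvS_replicate (z : Nat) (l : List Int) (run : Nat) :
    pvS (List.replicate z 0 ++ l) run = pvS l (run + z) := by
  induction z generalizing run with
  | zero => simp
  | succ z ih =>
    rw [List.replicate_succ, List.cons_append]
    show pvS (0 :: (List.replicate z 0 ++ l)) run = pvS l (run + (z + 1))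
    rw [pvS, if_pos rfl, ih]
    congr 1
    omega

theorem pvS_decomp (zs : List Int) (h : pvTrail zs < zs.length) (run : Nat) :
    pvS zs run = 8 * (((run + pvTrail zs) / 15 : Nat) : Int) + pvCeilLogF (zs[pvTrail zs]) + 8
      + pvS (zs.drop (pvTrail zs + 1)) 0 := by
  conv_lhs => rw [← List.take_append_drop (pvTrail zs) zs, pvTrail_take]
  rw [pvS_replicate]
  rw [List.drop_eq_getElem_cons h]
  rw [pvS, if_neg (pvTrail_getElem zs h)]

theorem pvS_zrl (zs : List Int) (h15 : 15 ≤ pvTrail zs) (hlt : pvTrail zs < zs.length) :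
    pvS zs 0 = 8 + pvS (zs.drop 15) 0 := by
  have h1 := pvS_decomp zs hlt 0
  have hd : zs.drop 15 = List.replicate (pvTrail zs - 15) 0 ++ zs.drop (pvTrail zs) := by
    conv_lhs => rw [← List.take_append_drop (pvTrail zs) zs, pvTrail_take]
    rw [List.drop_append_of_le_length (by simp; omega), List.drop_replicate]
  have h2 : pvS (zs.drop 15) 0 = pvS (zs.drop (pvTrail zs)) (pvTrail zs - 15) := by
    rw [hd, pvS_replicate]; congr 1; omega
  have h3 : pvS (zs.drop (pvTrail zs)) (pvTrail zs - 15)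
      = 8 * (((pvTrail zs - 15) / 15 : Nat) : Int) + pvCeilLogF (zs[pvTrail zs]'hlt) + 8
        + pvS (zs.drop (pvTrail zs + 1)) 0 := by
    rw [List.drop_eq_getElem_cons hlt, pvS, if_neg (pvTrail_getElem zs hlt)]
  have hdiv : (0 + pvTrail zs) / 15 = (pvTrail zs - 15) / 15 + 1 := by
    omega
  rw [h1, h2, h3, hdiv]
  push_cast
  ring

theorem pvOuterA_eq (ac : List Int) (L : Nat) (hL : L ≤ ac.length)
    (hlast : (ac.take L).getLast? ≠ some (0 : Int)) :
    ∀ f i bits, i ≤ L → L - i + 1 ≤ f →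
      pvOuterA ac (L : Int) f i bits = bits + pvS ((ac.take L).drop i) 0 := by
  intro f
  induction f with
  | zero => intro i bits _ hf; omega
  | succ f ih =>
    intro i bits hi hf
    by_cases hi' : i < L
    · -- the remaining slice is nonempty and still ends in a nonzero
      have hlen : ((ac.take L).drop i).length = L - i := by simp; omega
      have hne : (ac.take L).drop i ≠ [] := by
        intro h0; rw [h0] at hlen; simp at hlen; omega
      have hlast' : ((ac.take L).drop i).getLast? ≠ some (0 : Int) := by
        rw [pvGetLast?_drop _ _ (by simp; omega)]; exact hlast
      have hcz : pvTrail ((ac.take L).drop i) < L - i := by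
        rw [← hlen]; exact pvTrail_lt _ hne hlast'
      have hp : pvInnerA ac (L : Int) 15 0 i
          = (min 15 (pvTrail ((ac.take L).drop i)), i + min 15 (pvTrail ((ac.take L).drop i))) := by
        rw [pvInnerA_eq ac L hL 15 0 i (by omega)]
        simp
      have hget : ∀ j : Nat, ∀ hj : j < ((ac.take L).drop i).length,
          PySem.List.pyGetD ac ((i + j : Nat) : Int) 0 = ((ac.take L).drop i)[j]'hj := by
        intro j hj
        rw [pvGetD_eq ac (i + j) (by rw [hlen] at hj; omega)]
        rw [List.getElem_drop, List.getElem_take]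
      by_cases h15 : pvTrail ((ac.take L).drop i) < 15
      · have hmin : min 15 (pvTrail ((ac.take L).drop i)) = pvTrail ((ac.take L).drop i) := by
          omega
        have hgetv := hget (pvTrail ((ac.take L).drop i)) (by omega)
        have hvne := pvTrail_getElem ((ac.take L).drop i) (by omega)
        rw [pvOuterA, if_pos (show ((i : Nat) : Int) < (L : Int) from by exact_mod_cast hi'),
            hp, hmin]
        rw [if_pos ⟨h15,
              show ((i + pvTrail ((ac.take L).drop i) : Nat) : Int) < (L : Int) from
                by exact_mod_cast (by omega : i + pvTrail ((ac.take L).drop i) < L),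
              show PySem.List.pyGetD ac ((i + pvTrail ((ac.take L).drop i) : Nat) : Int) 0 ≠ 0 from
                by rw [hgetv]; exact hvne⟩]
        rw [hgetv]
        rw [ih (i + pvTrail ((ac.take L).drop i) + 1) _ (by omega) (by omega)]
        rw [show (ac.take L).drop (i + pvTrail ((ac.take L).drop i) + 1)
              = ((ac.take L).drop i).drop (pvTrail ((ac.take L).drop i) + 1) from by
            rw [List.drop_drop, Nat.add_assoc]]
        rw [pvS_decomp ((ac.take L).drop i) (by omega) 0]
        rw [show (0 + pvTrail ((ac.take L).drop i)) / 15 = 0 from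
              Nat.div_eq_of_lt (by omega)]
        push_cast
        ring
      · have hmin : min 15 (pvTrail ((ac.take L).drop i)) = 15 := by omega
        rw [pvOuterA, if_pos (show ((i : Nat) : Int) < (L : Int) from by exact_mod_cast hi'),
            hp, hmin]
        rw [if_neg (by intro h; exact absurd h.1 (by norm_num))]
        rw [if_pos (by norm_num : (15 : Nat) ≤ 15)]
        rw [ih (i + 15) _ (by omega) (by omega)]
        rw [show (ac.take L).drop (i + 15) = ((ac.take L).drop i).drop 15 from by
            rw [List.drop_drop]]
        rw [pvS_zrl ((ac.take L).drop i) (by omega) (by omega)]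
        ring
    · have hnil : (ac.take L).drop i = [] := by
        apply List.drop_eq_nil_of_le; simp; omega
      rw [pvOuterA, if_neg (show ¬ ((i : Nat) : Int) < (L : Int) from by
            exact_mod_cast (by omega : ¬ i < L)), hnil]
      simp [pvS]

-- A's whole computation, as a function of the trailing-zero count t = pvTrail ac.reverse
theorem pvCoreA (ac : List Int) :
    pvOuterA ac (PySem.List.len ac - pvLastA ac.reverse 0 (PySem.List.len ac) - 1)
        (ac.length + 1) 0 0 + 8
      = if pvTrail ac.reverse = 0 then 8
        else 8 + pvS (ac.take (ac.length - pvTrail ac.reverse)) 0 := by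
  have hlen : PySem.List.len ac = (ac.length : Int) := by simp [PySem.List.len_eq]
  rw [pvLastA_eq]
  by_cases h0 : pvTrail ac.reverse = 0
  · rw [if_pos h0, if_pos h0]
    have hlim : PySem.List.len ac - PySem.List.len ac - 1 = (-1 : Int) := by ring
    rw [hlim, pvOuterA, if_neg (by norm_num : ¬ (((0 : Nat) : Int) < (-1 : Int)))]
    norm_num
  · rw [if_neg h0, if_neg h0]
    have htle : pvTrail ac.reverse ≤ ac.length := by
      have := pvTrail_le ac.reverse; simpa using this
    have hlim : PySem.List.len ac - (((0 : Nat) : Int) + (pvTrail ac.reverse : Int) - 1) - 1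
        = ((ac.length - pvTrail ac.reverse : Nat) : Int) := by
      rw [hlen]; push_cast; omega
    rw [hlim]
    have hlast : (ac.take (ac.length - pvTrail ac.reverse)).getLast? ≠ some (0 : Int) := by
      by_cases hL0 : ac.length - pvTrail ac.reverse = 0
      · simp [hL0]
      · have htlt : pvTrail ac.reverse < ac.length := by omega
        have hlen2 : (ac.take (ac.length - pvTrail ac.reverse)).length
            = ac.length - pvTrail ac.reverse := by simp
        have hnz : ac.reverse[pvTrail ac.reverse]'(by simp; omega) ≠ 0 :=
          pvTrail_getElem ac.reverse (by simp; omega)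
        rw [List.getLast?_eq_getElem?, hlen2,
            List.getElem?_eq_getElem (by rw [hlen2]; omega)]
        intro hcon
        apply hnz
        have heq : (ac.take (ac.length - pvTrail ac.reverse))[ac.length - pvTrail ac.reverse - 1]'(by
              rw [hlen2]; omega)
            = ac.reverse[pvTrail ac.reverse]'(by simp; omega) := by
          rw [List.getElem_take, List.getElem_reverse]
          congr 1
          omega
        rw [← heq]
        exact Option.some.inj hcon
    rw [pvOuterA_eq ac (ac.length - pvTrail ac.reverse) (by omega) hlast
          (ac.length + 1) 0 0 (by omega) (by omega)]
    rw [List.drop_zero]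
    ring

-- B's whole computation, in the same shape
theorem pvCoreB (ac_s : List (String × List Int)) :
    ac_coder_alt ac_s
      = (if (((PySem.Dict.mk ac_s).get? "AC").getD []).getLast? = some 0 then
          8 + pvS ((((PySem.Dict.mk ac_s).get? "AC").getD []).take
            ((((PySem.Dict.mk ac_s).get? "AC").getD []).length
              - pvTrail (((PySem.Dict.mk ac_s).get? "AC").getD []).reverse)) 0
         else 8) := by
  simp only [ac_coder_alt, pvSum_table]

theorem pvTrail_reverse_zero_of_last (l : List Int) (h : l.getLast?.getD 0 ≠ 0) :
    pvTrail l.reverse = 0 := by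
  have hh : l.reverse.head? = l.getLast? := by simp
  cases hr : l.reverse with
  | nil => simp [pvTrail]
  | cons x xs =>
    have hx : x ≠ 0 := by
      rw [hr] at hh
      simp at hh
      rw [← hh] at h
      simpa using h
    simp [pvTrail, hx]

theorem pvTrail_reverse_pos_of_last_zero (l : List Int) (hne : l ≠ [])
    (h : l.getLast?.getD 0 = 0) : pvTrail l.reverse ≠ 0 := by
  have hh : l.reverse.head? = l.getLast? := by simp
  cases hr : l.reverse with
  | nil => exact absurd (by simpa using congrArg List.reverse hr) hne
  | cons x xs =>
    have hlast : l.getLast? = some x := by rw [hr] at hh; simpa using hh.symm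
    have hx : x = 0 := by rw [hlast] at h; simpa using h
    simp [pvTrail, hx]

-- ===== VERDICT (by name: the statement is the Claim_ definition above) =====
theorem ac_coder_spec : Claim_equal_ac_coder := by
  intro ac_s _ _
  unfold Spec_ac_coder
  rw [pvCoreB]
  show ac_coder ac_s = _
  simp only [ac_coder]
  rw [pvCoreA]
  set ac := ((PySem.Dict.mk ac_s).get? "AC").getD [] with hac
  by_cases hlast : ac.getLast? = some 0
  · rw [if_pos hlast]
    have hne : ac ≠ [] := by
      intro h; rw [h] at hlast; simp at hlast
    have ht : pvTrail ac.reverse ≠ 0 :=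
      pvTrail_reverse_pos_of_last_zero ac hne (by rw [hlast]; rfl)
    rw [if_neg ht]
  · rw [if_neg hlast]
    have ht : pvTrail ac.reverse = 0 := by
      cases h : ac.getLast? with
      | none =>
        have : ac = [] := List.getLast?_eq_none_iff.mp h
        simp [this, pvTrail]
      | some v =>
        have hv : v ≠ 0 := by
          intro h0; rw [h0] at h; exact hlast h
        exact pvTrail_reverse_zero_of_last ac (by rw [h]; simpa using hv)
    rw [if_pos ht]
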